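-- pv_equiv track=rewrite | github.com/stoneshik/ac-third-lab | isa.py | string_to_hex_list
-- ===== SOURCE A (Python) =====
-- def string_to_hex_list(word_hex_num: int, word_size: int, value: str) -> list[str]:
--     chars: list[str] = []
--     for char in reversed(value):
--         if char == '\\':
--             if chars[-1] == 'n':
--                 chars[-1] = '\n'
--             elif chars[-1] == 't':
--                 chars[-1] = '\t'
--             elif chars[-1] == 'r':
--                 chars[-1] = '\r'
--             else:
--                 raise Exception(f"Incorrect special char \\{char[-1]}")
--             continue
--         chars.append(char)
--     chars.reverse()
--     grouped_chars: list[list[str]] = [chars[i:i + word_size] for i in range(0, len(chars), word_size)]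
--     hex_list: list[str] = []
--     for group_char in grouped_chars:
--         hex_value: str = ''
--         for char in group_char:
--             symbol_code = ord(char)
--             assert -128 <= symbol_code <= 127, f"it's not ascii symbol: code - {symbol_code}"
--             hex_value = hex(symbol_code)[2:] + hex_value
--         hex_value = '0' * (word_hex_num - len(hex_value)) + hex_value
--         hex_list.append(hex_value)
--     return hex_list
-- ===== SOURCE B (Python) =====
-- def string_to_hex_list(word_hex_num: int, word_size: int, value: str) -> list[str]:
--     escapes = {'n': '\n', 't': '\t', 'r': '\r'}
--     chars: list[str] = []
--     i = 0
--     while i < len(value):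
--         c = value[i]
--         if c == '\\':
--             e = value[i + 1]
--             if e not in escapes:
--                 raise Exception("Incorrect special char \\\\")
--             chars.append(escapes[e])
--             i += 2
--         else:
--             chars.append(c)
--             i += 1
--     return [''.join(format(ord(c), 'x') for c in reversed(chars[j:j + word_size])).rjust(word_hex_num, '0')
--             for j in range(0, len(chars), word_size)]
-- ===== Notes on version B (the rewrite author's own statement) =====
-- stated objective: idiomatic
-- what changed: B decodes escapes with a single forward scan that pairs each backslash with its following character directly (instead of A's reverse scan that retroactively mutates the last appended element), and builds each hex word in one comprehension joining per-char hex over the reversed slice, instead of A's nested loops that prepend onto an accumulator string.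
import Mathlib
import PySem

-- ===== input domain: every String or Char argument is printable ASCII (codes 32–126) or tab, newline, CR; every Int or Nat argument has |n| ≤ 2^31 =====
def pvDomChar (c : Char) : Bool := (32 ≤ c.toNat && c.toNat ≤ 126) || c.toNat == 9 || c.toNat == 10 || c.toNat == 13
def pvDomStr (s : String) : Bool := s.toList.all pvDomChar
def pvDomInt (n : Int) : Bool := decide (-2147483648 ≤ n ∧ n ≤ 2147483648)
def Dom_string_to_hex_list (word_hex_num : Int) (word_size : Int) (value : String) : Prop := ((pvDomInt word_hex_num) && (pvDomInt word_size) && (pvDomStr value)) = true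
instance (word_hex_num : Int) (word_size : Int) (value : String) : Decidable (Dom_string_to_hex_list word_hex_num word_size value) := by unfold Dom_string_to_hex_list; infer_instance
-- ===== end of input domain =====

-- B replaces A's reverse scan (which retroactively mutates the last appended char at each
-- backslash) by a single forward scan pairing each backslash with its following character,
-- and builds each hex word by one comprehension over the reversed group; objective: idiomatic.


-- ===== PORT A =====

-- hex(ord(c))[2:] : ord(c) ≥ 0 here, so this is the lowercase hex digit string (exact)
def pvHex (c : Char) : List Char := Nat.toDigits 16 c.toNat

-- one iteration of A's `for char in reversed(value)` body; none = IndexError (chars[-1] on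
-- empty chars) or the explicit `raise Exception(...)`
def pvAStep (chars : List Char) (c : Char) : Option (List Char) :=
  if c = '\\' then
    match chars.getLast? with
    | none => none
    | some l =>
      if l = 'n' then some (chars.dropLast ++ ['\n'])
      else if l = 't' then some (chars.dropLast ++ ['\t'])
      else if l = 'r' then some (chars.dropLast ++ ['\r'])
      else none
  else some (chars ++ [c])

def pvAScan (chars : List Char) : List Char → Option (List Char)
  | [] => some chars
  | c :: rest =>
    match pvAStep chars c with
    | none => none
    | some chars' => pvAScan chars' rest

-- inner loop: hex_value = hex(ord(char))[2:] + hex_value, then '0'*(word_hex_num-len)+hex_value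
-- ('0' * k is empty for k < 0, exactly .toNat; the assert always holds on the ASCII domain)
def pvAHexWord (word_hex_num : Int) (g : List Char) : List Char :=
  let hv := g.foldl (fun hv c => pvHex c ++ hv) []
  List.replicate (word_hex_num - hv.length).toNat '0' ++ hv

def string_to_hex_list (word_hex_num : Int) (word_size : Int) (value : String) : List String :=
  match pvAScan [] value.toList.reverse with
  | none => []    -- A raises here; excluded by Pre_
  | some chars0 =>
    let chars := chars0.reverse
    let grouped := (PySem.List.pyRange 0 chars.length word_size).map
      (fun i => PySem.List.slice chars (some i) (some (i + word_size)))
    grouped.foldl (fun acc g => acc ++ [String.ofList (pvAHexWord word_hex_num g)]) []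

-- ===== PORT B =====

-- the `escapes` dict of Source B
def pvEsc : PySem.Dict Char Char := PySem.Dict.ofList [('n', '\n'), ('t', '\t'), ('r', '\r')]

-- Source B's while loop over the index i, as tail recursion on the remaining suffix;
-- none = IndexError (value[i+1] past the end) or the explicit raise
def pvBScan (chars : List Char) : List Char → Option (List Char)
  | [] => some chars
  | c :: rest =>
    if c = '\\' then
      match rest with
      | [] => none
      | e :: rest' =>
        match pvEsc.get? e with
        | none => none
        | some d => pvBScan (chars ++ [d]) rest'
    else pvBScan (chars ++ [c]) rest

-- ''.join(format(ord(c),'x') for c in reversed(group)).rjust(word_hex_num,'0');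
-- rjust with fill '0' on a sign-free string and Int width is exactly this left pad
def pvBHexWord (word_hex_num : Int) (g : List Char) : List Char :=
  let s := (g.reverse.map pvHex).flatten
  List.replicate (word_hex_num - s.length).toNat '0' ++ s

def string_to_hex_list_alt (word_hex_num : Int) (word_size : Int) (value : String) : List String :=
  match pvBScan [] value.toList with
  | none => []    -- B raises here; excluded by Pre_
  | some chars =>
    (PySem.List.pyRange 0 chars.length word_size).map
      (fun j => String.ofList (pvBHexWord word_hex_num
        (PySem.List.slice chars (some j) (some (j + word_size)))))

-- ===== PRECONDITION & SPEC =====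

-- Pre_ excludes exactly the inputs where A raises: word_size = 0 (range() ValueError) and
-- strings with a backslash not immediately followed by 'n'/'t'/'r' (IndexError on a trailing
-- backslash, otherwise the explicit Exception); B raises on exactly the same inputs.
def Pre_string_to_hex_list (word_hex_num : Int) (word_size : Int) (value : String) : Prop :=
  word_size ≠ 0 ∧
  ∀ i : Nat, i < value.toList.length → value.toList[i]? = some '\\' →
    (value.toList[i+1]? = some 'n' ∨ value.toList[i+1]? = some 't' ∨ value.toList[i+1]? = some 'r')
instance (word_hex_num : Int) (word_size : Int) (value : String) : Decidable (Pre_string_to_hex_list word_hex_num word_size value) := by unfold Pre_string_to_hex_list; infer_instance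

def pvWitness_string_to_hex_list : Int × Int × String := (8, 4, "ab\\ncd")

def Spec_string_to_hex_list (word_hex_num : Int) (word_size : Int) (value : String) (out : List String) : Prop := out = string_to_hex_list_alt word_hex_num word_size value
instance (word_hex_num : Int) (word_size : Int) (value : String) (out : List String) : Decidable (Spec_string_to_hex_list word_hex_num word_size value out) := by unfold Spec_string_to_hex_list; infer_instance

-- ===== CLAIM (what is proved, stated in full; the proofs are below) =====
def Claim_equal_string_to_hex_list : Prop := ∀ (word_hex_num : Int) (word_size : Int) (value : String), Dom_string_to_hex_list word_hex_num word_size value → Pre_string_to_hex_list word_hex_num word_size value → Spec_string_to_hex_list word_hex_num word_size value (string_to_hex_list word_hex_num word_size value)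

-- ===== LEMMAS AND PROOFS =====

-- the escape decoding both scans perform
def pvDec (e : Char) : Char :=
  if e = 'n' then '\n' else if e = 't' then '\t' else if e = 'r' then '\r' else e

-- the decoded character list both scans compute on well-formed input
def pvD : List Char → List Char
  | [] => []
  | c :: rest =>
    if c = '\\' then
      match rest with
      | [] => []
      | e :: rest' => pvDec e :: pvD rest'
    else c :: pvD rest

theorem pvD_esc (e : Char) (rest' : List Char) : pvD ('\\' :: e :: rest') = pvDec e :: pvD rest' := by
  rw [pvD.eq_def]; simp
theorem pvD_cons {c : Char} (hc : c ≠ '\\') (rest : List Char) : pvD (c :: rest) = c :: pvD rest := by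
  rw [pvD.eq_def]; simp [hc]

-- the escape-validity half of Pre_, on a raw char list
def pvOk (l : List Char) : Prop :=
  ∀ i : Nat, i < l.length → l[i]? = some '\\' →
    (l[i+1]? = some 'n' ∨ l[i+1]? = some 't' ∨ l[i+1]? = some 'r')

theorem pvOk_tail {c : Char} {l : List Char} (h : pvOk (c :: l)) : pvOk l := by
  intro i hi hv
  have := h (i + 1) (by simpa using Nat.succ_lt_succ hi) (by simpa using hv)
  simpa using this

-- on a well-formed list a backslash's tail starts with 'n'/'t'/'r'
theorem pvOk_head {l : List Char} (h : pvOk ('\\' :: l)) :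
    ∃ e rest', l = e :: rest' ∧ (e = 'n' ∨ e = 't' ∨ e = 'r') := by
  have h0 := h 0 (by simp) (by simp)
  cases l with
  | nil => simp at h0
  | cons e rest' =>
    refine ⟨e, rest', rfl, ?_⟩
    simpa using h0

theorem pvEsc_n : pvEsc.get? 'n' = some '\n' := by decide
theorem pvEsc_t : pvEsc.get? 't' = some '\t' := by decide
theorem pvEsc_r : pvEsc.get? 'r' = some '\r' := by decide

theorem pvBScan_cons_ne {c : Char} (hc : c ≠ '\\') (chars rest : List Char) :
    pvBScan chars (c :: rest) = pvBScan (chars ++ [c]) rest := by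
  rw [pvBScan.eq_def]; simp [hc]

theorem pvBScan_esc {e d : Char} (he : pvEsc.get? e = some d) (chars rest' : List Char) :
    pvBScan chars ('\\' :: e :: rest') = pvBScan (chars ++ [d]) rest' := by
  rw [pvBScan.eq_def]; simp [he]

-- B's forward scan returns the decoded list (fuel = length bound for the two-step recursion)
theorem pvBScan_ok_fuel : ∀ (n : Nat) (l : List Char), l.length ≤ n → pvOk l → ∀ chars,
    pvBScan chars l = some (chars ++ pvD l) := by
  intro n
  induction n with
  | zero =>
    intro l hl _ chars
    have : l = [] := List.length_eq_zero_iff.mp (Nat.le_zero.mp hl)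
    subst this; simp [pvBScan, pvD]
  | succ n ih =>
    intro l hl h chars
    cases l with
    | nil => simp [pvBScan, pvD]
    | cons c rest =>
      by_cases hc : c = '\\'
      · subst hc
        obtain ⟨e, rest', heq, he⟩ := pvOk_head h
        subst heq
        have hok : pvOk rest' := pvOk_tail (pvOk_tail h)
        have hlen : rest'.length ≤ n := by simp at hl; omega
        rcases he with he | he | he <;> subst he
        · rw [pvBScan_esc pvEsc_n, ih rest' hlen hok, pvD_esc]; simp [pvDec]
        · rw [pvBScan_esc pvEsc_t, ih rest' hlen hok, pvD_esc]; simp [pvDec]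
        · rw [pvBScan_esc pvEsc_r, ih rest' hlen hok, pvD_esc]; simp [pvDec]
      · have hok : pvOk rest := pvOk_tail h
        have hlen : rest.length ≤ n := by simp at hl; omega
        rw [pvBScan_cons_ne hc, ih rest hlen hok, pvD_cons hc]
        simp

-- A's reverse scan, run on the reversal of a well-formed list, accumulates the reversed
-- decoded list: when it meets a backslash the escape char was appended just before, so the
-- chars[-1] rewrite turns it into the decoded char
theorem pvAScan_ok_fuel : ∀ (n : Nat) (l : List Char), l.length ≤ n → pvOk l → ∀ chars rest,
    pvAScan chars (l.reverse ++ rest) = pvAScan (chars ++ (pvD l).reverse) rest := by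
  intro n
  induction n with
  | zero =>
    intro l hl _ chars rest
    have : l = [] := List.length_eq_zero_iff.mp (Nat.le_zero.mp hl)
    subst this; simp [pvD]
  | succ n ih =>
    intro l hl h chars rest
    cases l with
    | nil => simp [pvD]
    | cons c rest₁ =>
      by_cases hc : c = '\\'
      · subst hc
        obtain ⟨e, rest', heq, he⟩ := pvOk_head h
        subst heq
        have hok : pvOk rest' := pvOk_tail (pvOk_tail h)
        have hlen : rest'.length ≤ n := by simp at hl; omega
        have hr : ('\\' :: e :: rest').reverse ++ rest
            = rest'.reverse ++ (e :: '\\' :: rest) := by simp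
        rw [hr, ih rest' hlen hok chars (e :: '\\' :: rest), pvD_esc]
        rcases he with he | he | he <;> subst he <;>
          simp [pvAScan, pvAStep, pvDec]
      · have hok : pvOk rest₁ := pvOk_tail h
        have hlen : rest₁.length ≤ n := by simp at hl; omega
        have hr : (c :: rest₁).reverse ++ rest = rest₁.reverse ++ (c :: rest) := by simp
        rw [hr, ih rest₁ hlen hok chars (c :: rest), pvD_cons hc]
        simp [pvAScan, pvAStep, hc]

-- per-group: A's prepending accumulator equals B's join over the reversed group
theorem pvHexWord_eq (w : Int) : ∀ (g : List Char), pvAHexWord w g = pvBHexWord w g := by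
  have key : ∀ (g : List Char) (acc : List Char),
      g.foldl (fun hv c => pvHex c ++ hv) acc = (g.reverse.map pvHex).flatten ++ acc := by
    intro g
    induction g with
    | nil => simp
    | cons c g' ih => intro acc; simp [List.foldl_cons, ih, List.flatten_append]
  intro g
  simp [pvAHexWord, pvBHexWord, key g []]

-- ===== VERDICT (by name: the statement is the Claim_ definition above) =====
theorem string_to_hex_list_spec : Claim_equal_string_to_hex_list := by
  intro whn ws value _hdom hpre
  obtain ⟨hws, hok⟩ := hpre
  unfold Spec_string_to_hex_list string_to_hex_list string_to_hex_list_alt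
  have hA := pvAScan_ok_fuel value.toList.length value.toList le_rfl hok [] []
  simp only [List.append_nil, List.nil_append] at hA
  rw [hA, pvBScan_ok_fuel value.toList.length value.toList le_rfl hok []]
  simp only [pvAScan, List.nil_append, List.reverse_reverse]
  rw [PySem.List.foldl_append_singleton_eq_map, List.map_map]
  simp [pvHexWord_eq]
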